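-- pv_equiv track=rewrite | github.com/Amaranese/40-Projects-Ideas-For-Web-Developer | Chat App/analytics/views/stats.py | rewrite_client_arrays
-- ===== SOURCE A (Python) =====
-- from typing import Any, Dict, List, Optional, Tuple, Type, Union, cast
--
-- def client_label_map(name: str) -> str:
--     if name == "website":
--         return "Web app"
--     if name.startswith("desktop app"):
--         return "Old desktop app"
--     if name == "ZulipElectron":
--         return "Desktop app"
--     if name == "ZulipTerminal":
--         return "Terminal app"
--     if name == "ZulipAndroid":
--         return "Old Android app"
--     if name == "ZulipiOS":
--         return "Old iOS app"
--     if name == "ZulipMobile":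
--         return "Mobile app"
--     if name in ["ZulipPython", "API: Python"]:
--         return "Python API"
--     if name.startswith("Zulip") and name.endswith("Webhook"):
--         return name[len("Zulip") : -len("Webhook")] + " webhook"
--     return name
--
-- def rewrite_client_arrays(value_arrays: Dict[str, List[int]]) -> Dict[str, List[int]]:
--     mapped_arrays: Dict[str, List[int]] = {}
--     for label, array in value_arrays.items():
--         mapped_label = client_label_map(label)
--         if mapped_label in mapped_arrays:
--             for i in range(0, len(array)):
--                 mapped_arrays[mapped_label][i] += value_arrays[label][i]
--         else:
--             mapped_arrays[mapped_label] = [value_arrays[label][i] for i in range(0, len(array))]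
--     return mapped_arrays
-- ===== SOURCE B (Python) =====
-- def client_label_map(name: str) -> str:
--     if name == "website":
--         return "Web app"
--     if name.startswith("desktop app"):
--         return "Old desktop app"
--     if name == "ZulipElectron":
--         return "Desktop app"
--     if name == "ZulipTerminal":
--         return "Terminal app"
--     if name == "ZulipAndroid":
--         return "Old Android app"
--     if name == "ZulipiOS":
--         return "Old iOS app"
--     if name == "ZulipMobile":
--         return "Mobile app"
--     if name in ["ZulipPython", "API: Python"]:
--         return "Python API"
--     if name.startswith("Zulip") and name.endswith("Webhook"):
--         return name[len("Zulip") : -len("Webhook")] + " webhook"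
--     return name
--
--
-- def rewrite_client_arrays(value_arrays):
--     # Phase 1: group the original arrays by their remapped label, in first-encounter order.
--     groups = {}
--     for label, array in value_arrays.items():
--         groups.setdefault(client_label_map(label), []).append(array)
--     # Phase 2: sum each group element-wise onto a copy of its first array.
--     result = {}
--     for mapped, arrays in groups.items():
--         acc = list(arrays[0])
--         for arr in arrays[1:]:
--             for i in range(len(arr)):
--                 acc[i] += arr[i]
--         result[mapped] = acc
--     return result
-- ===== Notes on version B (the rewrite author's own statement) =====
-- stated objective: alternative
-- what changed: A aggregates in one interleaved pass (membership test per item, adding into or creating the result entry); B first groups the original arrays by remapped label into an ordered dict of lists, then reduces each group by element-wise addition onto a copy of its first array.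
import Mathlib
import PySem

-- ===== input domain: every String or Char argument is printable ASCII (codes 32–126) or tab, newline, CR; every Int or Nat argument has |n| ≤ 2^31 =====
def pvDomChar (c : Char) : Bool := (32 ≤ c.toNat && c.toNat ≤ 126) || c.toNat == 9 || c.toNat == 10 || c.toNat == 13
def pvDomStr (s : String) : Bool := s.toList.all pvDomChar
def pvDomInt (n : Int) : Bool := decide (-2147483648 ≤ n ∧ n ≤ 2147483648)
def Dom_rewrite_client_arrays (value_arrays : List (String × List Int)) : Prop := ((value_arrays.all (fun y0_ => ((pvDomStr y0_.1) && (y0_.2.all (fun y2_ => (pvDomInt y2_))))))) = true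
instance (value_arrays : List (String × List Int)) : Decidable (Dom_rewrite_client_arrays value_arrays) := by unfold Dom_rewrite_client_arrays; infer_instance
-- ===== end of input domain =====

-- B re-decomposes A's single interleaved fold into two phases (group arrays by remapped label, then
-- element-wise-sum each group); same cost, return value proved identical on Pre_.

-- shared module helper (both Pythons use the same client_label_map)
def clientLabelMap (name : String) : String :=
  if name == "website" then "Web app"
  else if PySem.Str.startswith name "desktop app" then "Old desktop app"
  else if name == "ZulipElectron" then "Desktop app"
  else if name == "ZulipTerminal" then "Terminal app"
  else if name == "ZulipAndroid" then "Old Android app"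
  else if name == "ZulipiOS" then "Old iOS app"
  else if name == "ZulipMobile" then "Mobile app"
  else if name == "ZulipPython" || name == "API: Python" then "Python API"  -- name in [...]
  else if PySem.Str.startswith name "Zulip" && PySem.Str.endswith name "Webhook" then
    -- name[len("Zulip") : -len("Webhook")] + " webhook"  (string + as List Char append, kernel-exact)
    String.ofList (PySem.List.slice name.toList (some 5) (some (-7)) ++ " webhook".toList)
  else name

-- ===== PORT A =====
-- dict → association list in insertion order; value_arrays[label] = first-match lookup (Dict.mk);
-- the in-place element loop 'mapped_arrays[mapped_label][i] += …' is the fold over range(len(array))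
-- updating the entry, written back with insert; pyGetD/pySetD defaults are only reached outside Pre_.
def rewrite_client_arrays (value_arrays : List (String × List Int)) : List (String × List Int) :=
  (value_arrays.foldl (fun (m : PySem.Dict String (List Int)) p =>
      let mapped := clientLabelMap p.1
      if m.contains mapped then
        m.insert mapped ((PySem.List.pyRange 0 (PySem.List.len p.2)).foldl
          (fun cur i => PySem.List.pySetD cur i
            (PySem.List.pyGetD cur i 0 + PySem.List.pyGetD ((PySem.Dict.mk value_arrays).getD p.1 []) i 0))
          (m.getD mapped []))
      else
        m.insert mapped ((PySem.List.pyRange 0 (PySem.List.len p.2)).map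
          (fun i => PySem.List.pyGetD ((PySem.Dict.mk value_arrays).getD p.1 []) i 0))
    ) PySem.Dict.empty).items

-- ===== PORT B =====
-- phase 1: groups = label-remapped arrays via setdefault(…,[]).append (= modify with [] ++ [array]);
-- phase 2: per group, copy of first array, add each later array element-wise, insert into result.
def rewrite_client_arrays_alt (value_arrays : List (String × List Int)) : List (String × List Int) :=
  ((((value_arrays.foldl (fun (g : PySem.Dict String (List (List Int))) p =>
        g.modify (clientLabelMap p.1) [] (fun ls => ls ++ [p.2])) PySem.Dict.empty)).items).foldl
    (fun (r : PySem.Dict String (List Int)) q =>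
      r.insert q.1 ((PySem.List.slice q.2 (some 1) none).foldl
        (fun acc arr => (PySem.List.pyRange 0 (PySem.List.len arr)).foldl
          (fun acc i => PySem.List.pySetD acc i (PySem.List.pyGetD acc i 0 + PySem.List.pyGetD arr i 0)) acc)
        (q.2.headD [])))  -- arrays[0]: every group is nonempty, so headD never takes its default
    PySem.Dict.empty).items

-- ===== PRECONDITION & SPEC =====
-- Pre_ excludes (a) association lists with duplicate keys, which cannot arise from a Python dict, and
-- (b) inputs where some array is longer than the FIRST array of its remapped-label group: exactly there
-- A (and B) raises IndexError in the '+=' loop.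
def Pre_rewrite_client_arrays (value_arrays : List (String × List Int)) : Prop :=
  (value_arrays.map Prod.fst).Nodup ∧
  ∀ p ∈ value_arrays, p.2.length ≤
    (((value_arrays.filter (fun q => clientLabelMap q.1 == clientLabelMap p.1)).head?.map
      (fun q => q.2.length)).getD 0)
instance (value_arrays : List (String × List Int)) : Decidable (Pre_rewrite_client_arrays value_arrays) := by
  unfold Pre_rewrite_client_arrays; infer_instance

def pvWitness_rewrite_client_arrays : (List (String × List Int)) :=
  [("website", [1, 2]), ("Web app", [3, -4]), ("ZulipMobile", [7])]

def Spec_rewrite_client_arrays (value_arrays : List (String × List Int)) (out : List (String × List Int)) : Prop := out = rewrite_client_arrays_alt value_arrays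
instance (value_arrays : List (String × List Int)) (out : List (String × List Int)) : Decidable (Spec_rewrite_client_arrays value_arrays out) := by unfold Spec_rewrite_client_arrays; infer_instance

-- ===== CLAIM (what is proved, stated in full; the proofs are below) =====
def Claim_equal_rewrite_client_arrays : Prop := ∀ (value_arrays : List (String × List Int)), Dom_rewrite_client_arrays value_arrays → Pre_rewrite_client_arrays value_arrays → Spec_rewrite_client_arrays value_arrays (rewrite_client_arrays value_arrays)

-- ===== LEMMAS AND PROOFS =====

-- element-wise addition of arr into acc over range(len(arr)) (the inner loop of both programs)
def addInto (acc arr : List Int) : List Int :=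
  (PySem.List.pyRange 0 (PySem.List.len arr)).foldl
    (fun acc i => PySem.List.pySetD acc i (PySem.List.pyGetD acc i 0 + PySem.List.pyGetD arr i 0)) acc

-- B's phase-2 reduction of one group
def sumG (ls : List (List Int)) : List Int := ls.tail.foldl addInto (ls.headD [])

-- A's step, after the first-match lookup value_arrays[label] is resolved to the iterated array p.2
def AStep (m : PySem.Dict String (List Int)) (p : String × List Int) : PySem.Dict String (List Int) :=
  if m.contains (clientLabelMap p.1) then
    m.insert (clientLabelMap p.1) (addInto (m.getD (clientLabelMap p.1) []) p.2)
  else m.insert (clientLabelMap p.1) p.2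

-- B's phase-1 step
def GStep (g : PySem.Dict String (List (List Int))) (p : String × List Int) : PySem.Dict String (List (List Int)) :=
  g.modify (clientLabelMap p.1) [] (fun ls => ls ++ [p.2])

-- reduce every group of a grouping dict
def mapVals (g : PySem.Dict String (List (List Int))) : PySem.Dict String (List Int) :=
  PySem.Dict.mk (g.items.map (fun q => (q.1, sumG q.2)))

lemma get?_mapVals (g : PySem.Dict String (List (List Int))) (k : String) :
    (mapVals g).get? k = (g.get? k).map sumG := by
  obtain ⟨items⟩ := g
  induction items with
  | nil => rfl
  | cons q rest ih =>
    show (PySem.Dict.mk ((q.1, sumG q.2) :: rest.map _)).get? k = _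
    rw [PySem.Dict.get?_mk_cons, PySem.Dict.get?_mk_cons]
    by_cases h : q.1 == k
    · simp [h]
    · simp only [h, Bool.false_eq_true, ite_false]
      exact ih

lemma contains_mapVals (g : PySem.Dict String (List (List Int))) (k : String) :
    (mapVals g).contains k = g.contains k := by
  rw [PySem.Dict.contains_eq_isSome_get?, PySem.Dict.contains_eq_isSome_get?, get?_mapVals]
  cases g.get? k <;> rfl

lemma sumG_append (vs : List (List Int)) (arr : List Int) (h : vs ≠ []) :
    sumG (vs ++ [arr]) = addInto (sumG vs) arr := by
  cases vs with
  | nil => exact absurd rfl h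
  | cons v0 rest => simp [sumG, List.foldl_append]

lemma step_comm (g : PySem.Dict String (List (List Int)))
    (hne : ∀ v ∈ g.values, v ≠ []) (p : String × List Int) :
    AStep (mapVals g) p = mapVals (GStep g p) := by
  have hmod : GStep g p = g.insert (clientLabelMap p.1) (g.getD (clientLabelMap p.1) [] ++ [p.2]) := rfl
  by_cases h : g.contains (clientLabelMap p.1)
  · -- existing group: both sides replace the entry in place
    have hsome : ∃ vs, g.get? (clientLabelMap p.1) = some vs := by
      rw [PySem.Dict.contains_eq_isSome_get?] at h
      cases hg : g.get? (clientLabelMap p.1) with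
      | none => rw [hg] at h; simp at h
      | some vs => exact ⟨vs, rfl⟩
    obtain ⟨vs, hvs⟩ := hsome
    have hvne : vs ≠ [] := by
      refine hne vs ?_
      have := PySem.Dict.mem_items_of_get?_eq_some g hvs
      exact List.mem_map.mpr ⟨_, this, rfl⟩
    have hgd : g.getD (clientLabelMap p.1) [] = vs := PySem.Dict.getD_of_get?_eq_some g [] hvs
    have hmgd : (mapVals g).getD (clientLabelMap p.1) [] = sumG vs := by
      rw [PySem.Dict.getD_eq_get?_getD, get?_mapVals, hvs]; rfl
    have hmc : (mapVals g).contains (clientLabelMap p.1) = true := by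
      rw [contains_mapVals]; exact h
    unfold AStep
    rw [hmc, if_pos rfl, hmgd, hmod, hgd]
    apply PySem.Dict.ext
    rw [PySem.Dict.items_insert_of_contains _ _ hmc]
    show _ = (g.insert (clientLabelMap p.1) (vs ++ [p.2])).items.map (fun q => (q.1, sumG q.2))
    rw [PySem.Dict.items_insert_of_contains _ _ h]
    unfold mapVals
    show (g.items.map _).map _ = _
    rw [List.map_map, List.map_map]
    refine List.map_congr_left (fun q _ => ?_)
    by_cases hq : q.1 == clientLabelMap p.1 <;>
      simp [Function.comp, hq, sumG_append vs p.2 hvne]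
  · -- fresh group: both sides append a new entry
    have hmc : (mapVals g).contains (clientLabelMap p.1) = false := by
      rw [contains_mapVals]; simpa using h
    have hgd : g.getD (clientLabelMap p.1) [] = [] :=
      PySem.Dict.getD_of_not_contains g [] (by simpa using h)
    unfold AStep
    rw [hmc]
    simp only [Bool.false_eq_true, if_false]
    rw [hmod, hgd]
    apply PySem.Dict.ext
    rw [PySem.Dict.items_insert_of_not_contains _ _ hmc]
    show _ = (g.insert (clientLabelMap p.1) ([] ++ [p.2])).items.map (fun q => (q.1, sumG q.2))
    rw [PySem.Dict.items_insert_of_not_contains _ _ (by simpa using h)]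
    unfold mapVals
    simp [sumG]

lemma vals_GStep (g : PySem.Dict String (List (List Int)))
    (hne : ∀ v ∈ g.values, v ≠ []) (p : String × List Int) :
    ∀ v ∈ (GStep g p).values, v ≠ [] := by
  intro v hv
  rcases PySem.Dict.mem_values_insert g (clientLabelMap p.1) _ v hv with h | h
  · subst h; simp
  · exact hne v h

lemma loop_eq (l : List (String × List Int)) :
    ∀ g : PySem.Dict String (List (List Int)), (∀ v ∈ g.values, v ≠ []) →
      l.foldl AStep (mapVals g) = mapVals (l.foldl GStep g) := by
  induction l with
  | nil => intro g _; rfl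
  | cons p l ih =>
    intro g hne
    simp only [List.foldl_cons]
    rw [step_comm g hne p]
    exact ih (GStep g p) (vals_GStep g hne p)

-- ===== VERDICT (by name: the statement is the Claim_ definition above) =====
theorem rewrite_client_arrays_spec : Claim_equal_rewrite_client_arrays := by
  unfold Claim_equal_rewrite_client_arrays
  intro xs _ hpre
  obtain ⟨hnd, _⟩ := hpre
  unfold Spec_rewrite_client_arrays
  -- A's fold, with value_arrays[label] resolved to the iterated array (keys are unique), is AStep
  have hA : rewrite_client_arrays xs = (xs.foldl AStep PySem.Dict.empty).items := by
    unfold rewrite_client_arrays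
    congr 1
    apply PySem.List.foldl_congr_mem
    intro m p hp
    have hlook : (PySem.Dict.mk xs).getD p.1 [] = p.2 := by
      exact PySem.Dict.getD_of_mem_items (PySem.Dict.mk xs) hp hnd []
    simp only [hlook, PySem.List.map_pyGetD_pyRange_zero]
    rfl
  -- B's result dict: fresh distinct keys, so its items are groups.items summed per group
  have hB : rewrite_client_arrays_alt xs = (mapVals (xs.foldl GStep PySem.Dict.empty)).items := by
    unfold rewrite_client_arrays_alt
    have hGnd : (xs.foldl GStep PySem.Dict.empty).keys.Nodup :=
      PySem.Dict.nodup_keys_foldl_modify_key xs (fun p => clientLabelMap p.1) []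
        (fun _ p => fun ls => ls ++ [p.2]) PySem.Dict.empty (by simp [PySem.Dict.keys_empty])
    rw [show (xs.foldl (fun (g : PySem.Dict String (List (List Int))) p =>
        g.modify (clientLabelMap p.1) [] (fun ls => ls ++ [p.2])) PySem.Dict.empty)
      = xs.foldl GStep PySem.Dict.empty from rfl]
    rw [PySem.Dict.items_foldl_insert_fresh ((xs.foldl GStep PySem.Dict.empty).items)
      (fun (q : String × List (List Int)) => q.1)
      (fun q => (PySem.List.slice q.2 (some 1) none).foldl
        (fun acc arr => (PySem.List.pyRange 0 (PySem.List.len arr)).foldl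
          (fun acc i => PySem.List.pySetD acc i (PySem.List.pyGetD acc i 0 + PySem.List.pyGetD arr i 0)) acc)
        (q.2.headD [])) PySem.Dict.empty
      (fun a _ => PySem.Dict.contains_empty a.1) hGnd]
    show _ = (mapVals (xs.foldl GStep PySem.Dict.empty)).items
    unfold mapVals
    simp only [show (PySem.Dict.empty : PySem.Dict String (List Int)).items = [] from rfl, List.nil_append]
    refine List.map_congr_left (fun q _ => ?_)
    rw [PySem.List.slice_from_one]
    rfl
  rw [hA, hB]
  have h0 : ∀ v ∈ (PySem.Dict.empty : PySem.Dict String (List (List Int))).values, v ≠ [] := by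
    intro v hv
    simp [PySem.Dict.values, PySem.Dict.empty] at hv
  have hmain := loop_eq xs PySem.Dict.empty h0
  rw [show mapVals PySem.Dict.empty = PySem.Dict.empty from rfl] at hmain
  rw [hmain]
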